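-- pv_equiv track=rewrite | github.com/RamananVr/Leetcodepython | backtracking_bit_manipulation/0411_minimum_unique_word_abbreviation.py | minAbbreviation
-- ===== SOURCE A (Python) =====
-- def minAbbreviation(target: str, dictionary: list[str]) -> str:
--     def to_abbr(mask):
--         """Convert a bitmask to an abbreviation."""
--         abbr = []
--         count = 0
--         for i in range(len(target)):
--             if mask & (1 << i):
--                 if count:
--                     abbr.append(str(count))
--                     count = 0
--                 abbr.append(target[i])
--             else:
--                 count += 1
--         if count:
--             abbr.append(str(count))
--         return ''.join(abbr)
--
--     def is_valid(mask):
--         """Check if the abbreviation conflicts with any word in the dictionary."""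
--         for word in dictionary:
--             match = True
--             for i in range(len(target)):
--                 if mask & (1 << i) and target[i] != word[i]:
--                     continue
--                 if not (mask & (1 << i)) and target[i] == word[i]:
--                     match = False
--                     break
--             if match:
--                 return False
--         return True
--
--     # Filter dictionary to only include words of the same length as the target
--     dictionary = [word for word in dictionary if len(word) == len(target)]
--
--     if not dictionary:
--         return str(len(target))
--
--     n = len(target)
--     min_len = float('inf')
--     result = target
--
--     # Generate all possible masks
--     for mask in range(1 << n):
--         abbr = to_abbr(mask)
--         if len(abbr) < min_len and is_valid(mask):
--             min_len = len(abbr)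
--             result = abbr
--
--     return result
-- ===== SOURCE B (Python) =====
-- def minAbbreviation(target, dictionary):
--     n = len(target)
--     diffs = []
--     for w in dictionary:
--         if len(w) == n:
--             d = 0
--             for i in range(n):
--                 if w[i] != target[i]:
--                     d |= 1 << i
--             diffs.append(d)
--     if not diffs:
--         return str(n)
--     full = (1 << n) - 1
--
--     def run_end(mask, j):
--         while j < n and not (mask >> j) & 1:
--             j += 1
--         return j
--
--     def abbr_len(mask):
--         L = 0
--         i = 0
--         while i < n:
--             if (mask >> i) & 1:
--                 L += 1
--                 i += 1
--             else:
--                 j = run_end(mask, i + 1)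
--                 L += len(str(j - i))
--                 i = j
--         return L
--
--     best = None
--     for mask in range(1 << n):
--         if all((mask | d) != full for d in diffs):
--             L = abbr_len(mask)
--             if best is None or L < best[0]:
--                 best = (L, mask)
--     if best is None:
--         return target
--     mask = best[1]
--     parts = []
--     i = 0
--     while i < n:
--         if (mask >> i) & 1:
--             parts.append(target[i])
--             i += 1
--         else:
--             j = run_end(mask, i + 1)
--             parts.append(str(j - i))
--             i = j
--     return ''.join(parts)
-- ===== Notes on version B (the rewrite author's own statement) =====
-- stated objective: alternative
-- what changed: B precomputes one difference-bitmask per same-length dictionary word so each mask's validity test is a bitwise check per word instead of a per-character scan, computes abbreviation lengths arithmetically by run-scanning the mask, and materializes only the winning abbreviation string at the end.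
import Mathlib
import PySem

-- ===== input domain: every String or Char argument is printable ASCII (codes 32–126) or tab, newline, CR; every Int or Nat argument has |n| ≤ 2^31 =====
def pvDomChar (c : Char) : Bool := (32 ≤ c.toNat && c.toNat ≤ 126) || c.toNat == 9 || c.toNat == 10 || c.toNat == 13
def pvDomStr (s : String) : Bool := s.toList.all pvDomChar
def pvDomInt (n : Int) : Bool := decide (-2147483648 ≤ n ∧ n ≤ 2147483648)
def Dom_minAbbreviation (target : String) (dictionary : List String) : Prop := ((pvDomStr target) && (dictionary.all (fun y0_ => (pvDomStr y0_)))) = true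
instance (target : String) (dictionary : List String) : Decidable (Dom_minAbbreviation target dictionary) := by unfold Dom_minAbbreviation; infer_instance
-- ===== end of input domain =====

-- B precomputes one difference-bitmask per same-length word so each mask's validity
-- test is a bitwise check per word, and only builds the winning abbreviation string.

-- ===== PORT A =====
-- str(count) as a list of chars (Python str of a nonnegative int)
def pvDigits (c : Nat) : List Char := (PySem.Int.toStr (c : Int)).toList

-- inner loop of is_valid over the index list, with Python's continue/break
def pvMatchA (t w : List Char) (mask : Nat) : List Nat → Bool
  | [] => true
  | i :: rest =>
    if (mask &&& (1 <<< i) != 0) && (t.getD i ' ' != w.getD i ' ') then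
      pvMatchA t w mask rest
    else if (mask &&& (1 <<< i) == 0) && (t.getD i ' ' == w.getD i ' ') then
      false
    else pvMatchA t w mask rest

-- is_valid: loop over dictionary words with early return False
def pvIsValidA (t : List Char) (dict : List (List Char)) (mask : Nat) : Bool :=
  match dict with
  | [] => true
  | w :: ws =>
    if pvMatchA t w mask (List.range t.length) then false else pvIsValidA t ws mask

-- to_abbr's for-loop: state (abbr parts, count)
def pvToAbbrGo (t : List Char) (mask : Nat) : List Nat → List (List Char) × Nat → List (List Char) × Nat
  | [], st => st
  | i :: rest, (abbr, count) =>
    if mask &&& (1 <<< i) != 0 then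
      pvToAbbrGo t mask rest ((if count ≠ 0 then abbr ++ [pvDigits count] else abbr) ++ [[t.getD i ' ']], 0)
    else pvToAbbrGo t mask rest (abbr, count + 1)

-- to_abbr: run the loop, flush the trailing count, join
def pvToAbbrA (t : List Char) (mask : Nat) : List Char :=
  let st := pvToAbbrGo t mask (List.range t.length) ([], 0)
  (if st.2 ≠ 0 then st.1 ++ [pvDigits st.2] else st.1).flatten

def minAbbreviation (target : String) (dictionary : List String) : String :=
  let t := target.toList
  let dict := (dictionary.filter (fun w => w.toList.length == t.length)).map String.toList
  if dict.isEmpty then PySem.Int.toStr (t.length : Int)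
  else
    let st := (List.range (2 ^ t.length)).foldl
      (fun (st : Option Nat × String) mask =>
        let abbr := pvToAbbrA t mask
        let better := match st.1 with | none => true | some m => decide (abbr.length < m)
        if better && pvIsValidA t dict mask then (some abbr.length, String.ofList abbr) else st)
      (none, target)
    st.2

-- ===== PORT B =====
-- difference bitmask of a same-length word against target
def pvDiffMask (t w : List Char) : Nat :=
  (List.range t.length).foldl
    (fun d i => if w.getD i ' ' ≠ t.getD i ' ' then d ||| (1 <<< i) else d) 0

-- run_end: while j < n and bit j of mask is unset: j += 1
def pvRunEnd (mask n : Nat) (j : Nat) : Nat :=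
  if _h : j < n then
    (if (mask >>> j) &&& 1 == 0 then pvRunEnd mask n (j + 1) else j)
  else j
termination_by n - j

theorem pvRunEnd_ge (mask n j : Nat) : j ≤ pvRunEnd mask n j := by
  unfold pvRunEnd
  split
  · split
    · exact le_trans (Nat.le_succ j) (pvRunEnd_ge mask n (j + 1))
    · exact le_refl j
  · exact le_refl j
termination_by n - j

-- abbr_len: arithmetic length of the abbreviation of mask
def pvAbbrLenB (mask n : Nat) (i : Nat) : Nat :=
  if _h : i < n then
    if (mask >>> i) &&& 1 != 0 then 1 + pvAbbrLenB mask n (i + 1)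
    else
      let j := pvRunEnd mask n (i + 1)
      (pvDigits (j - i)).length + pvAbbrLenB mask n j
  else 0
termination_by n - i
decreasing_by
  · omega
  · have := pvRunEnd_ge mask n (i + 1); omega

-- final loop of Source B: build the abbreviation of the winning mask (parts joined)
def pvBuildB (t : List Char) (mask n : Nat) (i : Nat) : List Char :=
  if _h : i < n then
    if (mask >>> i) &&& 1 != 0 then t.getD i ' ' :: pvBuildB t mask n (i + 1)
    else
      let j := pvRunEnd mask n (i + 1)
      pvDigits (j - i) ++ pvBuildB t mask n j
  else []
termination_by n - i
decreasing_by
  · omega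
  · have := pvRunEnd_ge mask n (i + 1); omega

def minAbbreviation_alt (target : String) (dictionary : List String) : String :=
  let t := target.toList
  let n := t.length
  let diffs := (dictionary.filter (fun w => w.toList.length == n)).map (fun w => pvDiffMask t w.toList)
  if diffs.isEmpty then PySem.Int.toStr (n : Int)
  else
    let full := 2 ^ n - 1
    let best := (List.range (2 ^ n)).foldl
      (fun (best : Option (Nat × Nat)) mask =>
        if diffs.all (fun d => mask ||| d != full) then
          let L := pvAbbrLenB mask n 0
          match best with
          | none => some (L, mask)
          | some (L0, m0) => if L < L0 then some (L, mask) else some (L0, m0)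
        else best)
      none
    match best with
    | none => target
    | some (_, m) => String.ofList (pvBuildB t m n 0)

-- ===== PRECONDITION & SPEC =====
def Spec_minAbbreviation (target : String) (dictionary : List String) (out : String) : Prop := out = minAbbreviation_alt target dictionary
instance (target : String) (dictionary : List String) (out : String) : Decidable (Spec_minAbbreviation target dictionary out) := by unfold Spec_minAbbreviation; infer_instance

-- ===== CLAIM (what is proved, stated in full; the proofs are below) =====
def Claim_equal_minAbbreviation : Prop := ∀ (target : String) (dictionary : List String), Dom_minAbbreviation target dictionary → Spec_minAbbreviation target dictionary (minAbbreviation target dictionary)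


-- Bool bridges between the ports' bit tests and Nat.testBit
theorem pvBit_and (mask i : Nat) : (mask &&& (1 <<< i) != 0) = mask.testBit i := by
  simp [Nat.testBit, Nat.one_shiftLeft, Nat.and_two_pow]
  cases h : mask >>> i % 2 == 1 <;> simp

theorem pvBit_and_eq (mask i : Nat) : (mask &&& (1 <<< i) == 0) = !mask.testBit i := by
  have := pvBit_and mask i
  cases h : mask.testBit i <;> simp [h] at this ⊢ <;> simpa using this

theorem pvBit_shift (mask i : Nat) : ((mask >>> i) &&& 1 == 0) = !mask.testBit i := by
  simp [Nat.testBit, Nat.and_one_is_mod, Nat.shiftRight_eq_div_pow]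
  rcases Nat.mod_two_eq_zero_or_one (mask / 2 ^ i) with h | h <;> simp [h]

theorem pvBit_shift_ne (mask i : Nat) : ((mask >>> i) &&& 1 != 0) = mask.testBit i := by
  have := pvBit_shift mask i
  cases h : mask.testBit i <;> simp [h] at this ⊢ <;> simpa using this

-- pvRunEnd characterization
theorem pvRunEnd_of_ge (mask n j : Nat) (h : n ≤ j) : pvRunEnd mask n j = j := by
  unfold pvRunEnd; simp [Nat.not_lt.mpr h]

theorem pvRunEnd_of_set (mask n j : Nat) (h : j < n) (hb : mask.testBit j = true) :
    pvRunEnd mask n j = j := by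
  have hb' : mask >>> j % 2 = 1 := by simpa [Nat.testBit] using hb
  conv_lhs => rw [pvRunEnd.eq_def]
  simp [h, hb']

theorem pvRunEnd_of_unset (mask n j : Nat) (h : j < n) (hb : mask.testBit j = false) :
    pvRunEnd mask n j = pvRunEnd mask n (j + 1) := by
  have hb' : mask >>> j % 2 = 0 := by
    have := hb; simp [Nat.testBit] at this; omega
  conv_lhs => rw [pvRunEnd.eq_def]
  simp [h, hb']

theorem pvRunEnd_le (mask n : Nat) : ∀ (k j : Nat), n - j = k → j ≤ n → pvRunEnd mask n j ≤ n := by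
  intro k
  induction k using Nat.strong_induction_on with
  | _ k ih =>
    intro j hk hj
    rcases Nat.lt_or_ge j n with h | h
    · cases hb : mask.testBit j with
      | true => rw [pvRunEnd_of_set mask n j h hb]; omega
      | false =>
        rw [pvRunEnd_of_unset mask n j h hb]
        exact ih (n - (j + 1)) (by omega) (j + 1) rfl (by omega)
    · rw [pvRunEnd_of_ge mask n j h]; omega

theorem pvRunEnd_stop (mask n : Nat) : ∀ (k j : Nat), n - j = k →
    pvRunEnd mask n j < n → mask.testBit (pvRunEnd mask n j) = true := by
  intro k
  induction k using Nat.strong_induction_on with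
  | _ k ih =>
    intro j hk hlt
    rcases Nat.lt_or_ge j n with h | h
    · cases hb : mask.testBit j with
      | true => rw [pvRunEnd_of_set mask n j h hb]; exact hb
      | false =>
        rw [pvRunEnd_of_unset mask n j h hb] at hlt ⊢
        exact ih (n - (j + 1)) (by omega) (j + 1) rfl hlt
    · rw [pvRunEnd_of_ge mask n j h] at hlt; omega

-- run-structured view of A's to_abbr loop
def pvGA (t : List Char) (mask : Nat) (i c : Nat) : List Char :=
  if _h : i < t.length then
    if mask.testBit i then
      (if c ≠ 0 then pvDigits c else []) ++ t.getD i ' ' :: pvGA t mask (i + 1) 0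
    else pvGA t mask (i + 1) (c + 1)
  else (if c ≠ 0 then pvDigits c else [])
termination_by t.length - i

-- finalization of A's to_abbr loop state (proof helper)
def pvFin (st : List (List Char) × Nat) : List Char :=
  (if st.2 ≠ 0 then st.1 ++ [pvDigits st.2] else st.1).flatten

theorem pvToAbbrGo_spec (t : List Char) (mask : Nat) :
    ∀ (k i : Nat) (abbr : List (List Char)) (c : Nat), i + k = t.length →
    pvFin (pvToAbbrGo t mask (List.range' i k) (abbr, c))
    = abbr.flatten ++ pvGA t mask i c := by
  intro k
  induction k with
  | zero =>
    intro i abbr c h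
    have hni : ¬ i < t.length := by omega
    rw [pvGA.eq_def, dif_neg hni]
    simp only [List.range'_zero, pvToAbbrGo, pvFin]
    by_cases hc : c = 0 <;> simp [hc]
  | succ k ih =>
    intro i abbr c h
    have hi : i < t.length := by omega
    rw [List.range'_succ]
    simp only [pvToAbbrGo]
    rw [pvGA.eq_def, dif_pos hi]
    cases hb : mask.testBit i with
    | true =>
      rw [if_pos (show (mask &&& (1 <<< i) != 0) = true by rw [pvBit_and]; exact hb)]
      simp only [eq_self_iff_true, if_true]
      rw [ih (i + 1) _ 0 (by omega)]
      by_cases hc : c = 0 <;> simp [hc]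
    | false =>
      rw [if_neg (show ¬ (mask &&& (1 <<< i) != 0) = true by rw [pvBit_and]; simp [hb])]
      simp only [Bool.false_eq_true, if_false]
      exact ih (i + 1) abbr (c + 1) (by omega)

theorem pvGA_run (t : List Char) (mask : Nat) :
    ∀ (k i c : Nat), t.length - i = k →
    pvGA t mask i c =
      (if pvRunEnd mask t.length i < t.length then
        (if c + (pvRunEnd mask t.length i - i) ≠ 0 then pvDigits (c + (pvRunEnd mask t.length i - i)) else [])
          ++ t.getD (pvRunEnd mask t.length i) ' ' :: pvGA t mask (pvRunEnd mask t.length i + 1) 0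
      else (if c + (pvRunEnd mask t.length i - i) ≠ 0 then pvDigits (c + (pvRunEnd mask t.length i - i)) else [])) := by
  intro k
  induction k using Nat.strong_induction_on with
  | _ k ih =>
    intro i c hk
    rcases Nat.lt_or_ge i t.length with hi | hi
    · cases hb : mask.testBit i with
      | true =>
        rw [pvRunEnd_of_set mask t.length i hi hb]
        rw [pvGA.eq_def, dif_pos hi, if_pos hb, if_pos hi]
        simp
      | false =>
        rw [pvRunEnd_of_unset mask t.length i hi hb]
        rw [pvGA.eq_def, dif_pos hi, if_neg (by simp [hb])]
        rw [ih (t.length - (i + 1)) (by omega) (i + 1) (c + 1) rfl]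
        have hge := pvRunEnd_ge mask t.length (i + 1)
        have heq : c + 1 + (pvRunEnd mask t.length (i + 1) - (i + 1))
            = c + (pvRunEnd mask t.length (i + 1) - i) := by omega
        rw [heq]
    · have hni : ¬ i < t.length := by omega
      rw [pvRunEnd_of_ge mask t.length i hi]
      rw [pvGA.eq_def, dif_neg hni, if_neg hni]
      simp

theorem pvBuildB_eq_gA (t : List Char) (mask : Nat) :
    ∀ (k i : Nat), t.length - i = k → pvBuildB t mask t.length i = pvGA t mask i 0 := by
  intro k
  induction k using Nat.strong_induction_on with
  | _ k ih =>
    intro i hk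
    rcases Nat.lt_or_ge i t.length with hi | hi
    · cases hb : mask.testBit i with
      | true =>
        rw [pvBuildB.eq_def, dif_pos hi, if_pos (show ((mask >>> i) &&& 1 != 0) = true by rw [pvBit_shift_ne]; exact hb)]
        rw [pvGA.eq_def, dif_pos hi, if_pos hb]
        rw [ih (t.length - (i + 1)) (by omega) (i + 1) rfl]
        simp
      | false =>
        rw [pvBuildB.eq_def, dif_pos hi, if_neg (show ¬ ((mask >>> i) &&& 1 != 0) = true by rw [pvBit_shift_ne]; simp [hb])]
        rw [pvGA.eq_def, dif_pos hi, if_neg (by simp [hb])]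
        rw [pvGA_run t mask (t.length - (i + 1)) (i + 1) 1 rfl]
        have hge := pvRunEnd_ge mask t.length (i + 1)
        have hle := pvRunEnd_le mask t.length (t.length - (i + 1)) (i + 1) rfl (by omega)
        have hsum : 1 + (pvRunEnd mask t.length (i + 1) - (i + 1))
            = pvRunEnd mask t.length (i + 1) - i := by omega
        rw [hsum]
        have hne : pvRunEnd mask t.length (i + 1) - i ≠ 0 := by omega
        rw [if_pos hne]
        show pvDigits (pvRunEnd mask t.length (i + 1) - i)
            ++ pvBuildB t mask t.length (pvRunEnd mask t.length (i + 1)) = _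
        rcases Nat.lt_or_ge (pvRunEnd mask t.length (i + 1)) t.length with hjlt | hjge
        · rw [if_pos hjlt]
          have hbj : mask.testBit (pvRunEnd mask t.length (i + 1)) = true :=
            pvRunEnd_stop mask t.length (t.length - (i + 1)) (i + 1) rfl hjlt
          rw [pvBuildB.eq_def, dif_pos hjlt,
              if_pos (show ((mask >>> (pvRunEnd mask t.length (i + 1))) &&& 1 != 0) = true by
                rw [pvBit_shift_ne]; exact hbj)]
          rw [ih (t.length - (pvRunEnd mask t.length (i + 1) + 1)) (by omega) (pvRunEnd mask t.length (i + 1) + 1) rfl]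
        · rw [if_neg (by omega)]
          rw [pvBuildB.eq_def, dif_neg (by omega)]
          simp
    · rw [pvBuildB.eq_def, dif_neg (by omega), pvGA.eq_def, dif_neg (by omega)]
      simp

theorem pvAbbrLenB_eq_length (t : List Char) (mask n : Nat) :
    ∀ (k i : Nat), n - i = k → pvAbbrLenB mask n i = (pvBuildB t mask n i).length := by
  intro k
  induction k using Nat.strong_induction_on with
  | _ k ih =>
    intro i hk
    rcases Nat.lt_or_ge i n with hi | hi
    · cases hb : ((mask >>> i) &&& 1 != 0) with
      | true =>
        rw [pvAbbrLenB.eq_def, pvBuildB.eq_def, dif_pos hi, dif_pos hi, if_pos hb, if_pos hb]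
        rw [ih (n - (i + 1)) (by omega) (i + 1) rfl]
        simp [Nat.add_comm]
      | false =>
        rw [pvAbbrLenB.eq_def, pvBuildB.eq_def, dif_pos hi, dif_pos hi,
            if_neg (by rw [hb]; exact Bool.false_ne_true), if_neg (by rw [hb]; exact Bool.false_ne_true)]
        show (pvDigits (pvRunEnd mask n (i + 1) - i)).length + pvAbbrLenB mask n (pvRunEnd mask n (i + 1))
          = (pvDigits (pvRunEnd mask n (i + 1) - i) ++ pvBuildB t mask n (pvRunEnd mask n (i + 1))).length
        have hge := pvRunEnd_ge mask n (i + 1)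
        rw [ih (n - pvRunEnd mask n (i + 1)) (by omega) (pvRunEnd mask n (i + 1)) rfl]
        simp
    · rw [pvAbbrLenB.eq_def, pvBuildB.eq_def, dif_neg (by omega), dif_neg (by omega)]
      simp

theorem pvToAbbrA_eq_build (t : List Char) (mask : Nat) :
    pvToAbbrA t mask = pvBuildB t mask t.length 0 := by
  have h := pvToAbbrGo_spec t mask t.length 0 [] 0 (by omega)
  simp only [pvFin, List.flatten_nil, List.nil_append] at h
  unfold pvToAbbrA
  rw [List.range_eq_range']
  rw [pvBuildB_eq_gA t mask t.length 0 (by omega)]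
  exact h

-- is_valid ↔ bitmask test
theorem pvMatchA_eq_all (t w : List Char) (mask : Nat) (is : List Nat) :
    pvMatchA t w mask is = is.all (fun i => mask.testBit i || (t.getD i ' ' != w.getD i ' ')) := by
  induction is with
  | nil => simp [pvMatchA]
  | cons i rest ih =>
    rw [List.all_cons, ← ih]
    simp only [pvMatchA, pvBit_and, pvBit_and_eq]
    cases hb : mask.testBit i <;> cases he : t.getD i ' ' == w.getD i ' ' <;>
      (simp only [List.getD_eq_getElem?_getD] at he; simp [bne, he])

theorem pvDiffMask_testBit_aux (t w : List Char) :
    ∀ (is : List Nat) (d0 k : Nat),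
    (is.foldl (fun d i => if w.getD i ' ' ≠ t.getD i ' ' then d ||| (1 <<< i) else d) d0).testBit k
    = (d0.testBit k || is.any (fun i => i == k && (w.getD i ' ' != t.getD i ' '))) := by
  intro is
  induction is with
  | nil => simp
  | cons i rest ih =>
    intro d0 k
    simp only [List.foldl_cons, List.any_cons]
    by_cases hne : w.getD i ' ' ≠ t.getD i ' '
    · rw [if_pos hne, ih]
      rw [Nat.testBit_or]
      rw [show ((1 <<< i : Nat).testBit k) = decide (i = k) by
        simp [Nat.one_shiftLeft, Nat.testBit_two_pow]]
      by_cases hik : i = k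
      · subst hik
        have he : (w.getD i ' ' == t.getD i ' ') = false := beq_eq_false_iff_ne.mpr hne
        simp only [List.getD_eq_getElem?_getD] at he
        simp [bne, he]
      · have hik' : (i == k) = false := beq_eq_false_iff_ne.mpr hik
        simp [hik, hik']
    · rw [if_neg hne, ih]
      have he : (w.getD i ' ' == t.getD i ' ') = true := beq_iff_eq.mpr (not_not.mp hne)
      simp only [List.getD_eq_getElem?_getD] at he
      simp [bne, he]

theorem pvDiffMask_testBit (t w : List Char) (k : Nat) :
    (pvDiffMask t w).testBit k
      = (decide (k < t.length) && (w.getD k ' ' != t.getD k ' ')) := by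
  unfold pvDiffMask
  rw [pvDiffMask_testBit_aux]
  simp only [Nat.zero_testBit, Bool.false_or]
  by_cases hk : k < t.length
  · simp only [hk, decide_true, Bool.true_and]
    cases hd : (w.getD k ' ' != t.getD k ' ') with
    | true =>
      rw [List.any_eq_true]
      refine ⟨k, List.mem_range.mpr hk, ?_⟩
      rw [hd]
      simp
    | false =>
      rw [List.any_eq_false]
      intro x hx
      by_cases hxk : x = k
      · subst hxk
        rw [hd]
        simp
      · simp [hxk]
  · simp only [hk, decide_false, Bool.false_and]
    rw [List.any_eq_false]
    intro x hx
    have hxk : x ≠ k := by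
      have := List.mem_range.mp hx
      omega
    simp [hxk]

theorem pvValid_word (t w : List Char) (mask : Nat) (hm : mask < 2 ^ t.length) :
    pvMatchA t w mask (List.range t.length) = true
      ↔ mask ||| pvDiffMask t w = 2 ^ t.length - 1 := by
  rw [pvMatchA_eq_all, List.all_eq_true]
  constructor
  · intro h
    apply Nat.eq_of_testBit_eq
    intro k
    rw [Nat.testBit_or, pvDiffMask_testBit, Nat.testBit_two_pow_sub_one]
    by_cases hk : k < t.length
    · have hp := h k (List.mem_range.mpr hk)
      simp only [hk, decide_true, Bool.true_and]
      cases hb : mask.testBit k with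
      | true => simp
      | false =>
        simp only [hb, Bool.false_or]
        simp only [hb, Bool.false_or] at hp
        exact bne_iff_ne.mpr (Ne.symm (bne_iff_ne.mp hp))
    · have h1 : mask.testBit k = false :=
        Nat.testBit_eq_false_of_lt (lt_of_lt_of_le hm (Nat.pow_le_pow_right (by norm_num) (by omega)))
      simp [h1, hk]
  · intro h i hi
    have hk := List.mem_range.mp hi
    have := congrArg (fun x => x.testBit i) h
    simp only [Nat.testBit_or, pvDiffMask_testBit, Nat.testBit_two_pow_sub_one] at this
    simp only [hk, decide_true, Bool.true_and] at this
    cases hb : mask.testBit i with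
    | true => simp
    | false =>
      simp only [hb, Bool.false_or] at this
      simp only [hb, Bool.false_or]
      exact bne_iff_ne.mpr (Ne.symm (bne_iff_ne.mp this))

theorem pvIsValidA_eq (t : List Char) (mask : Nat) (hm : mask < 2 ^ t.length) :
    ∀ (dict : List (List Char)),
    pvIsValidA t dict mask = dict.all (fun w => mask ||| pvDiffMask t w != 2 ^ t.length - 1) := by
  intro dict
  induction dict with
  | nil => simp [pvIsValidA]
  | cons w ws ih =>
    rw [pvIsValidA]
    cases hmw : pvMatchA t w mask (List.range t.length) with
    | true =>
      have := (pvValid_word t w mask hm).mp hmw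
      simp [this]
    | false =>
      have : ¬ mask ||| pvDiffMask t w = 2 ^ t.length - 1 := by
        intro hcon
        rw [(pvValid_word t w mask hm).mpr hcon] at hmw
        cases hmw
      simp only [if_neg Bool.false_ne_true, ih, List.all_cons]
      simp [this]

-- invariant of the two main loops: B's best corresponds to A's (min_len, result)
theorem pvFold_inv (t : List Char) (dict : List (List Char)) (diffs : List Nat) (target : String)
    (hdiffs : diffs = dict.map (pvDiffMask t)) :
    ∀ (ms : List Nat), (∀ m ∈ ms, m < 2 ^ t.length) →
    ∀ (sA : Option Nat × String) (sB : Option (Nat × Nat)),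
    ((sB = none ∧ sA = (none, target)) ∨
      (∃ L m, sB = some (L, m) ∧ L = (pvToAbbrA t m).length
        ∧ sA = (some L, String.ofList (pvToAbbrA t m)))) →
    ((ms.foldl (fun (st : Option Nat × String) mask =>
        if ((match st.1 with | none => true | some m => decide ((pvToAbbrA t mask).length < m))
            && pvIsValidA t dict mask) then
          (some (pvToAbbrA t mask).length, String.ofList (pvToAbbrA t mask))
        else st) sA = (none, target)
      ∧ ms.foldl (fun (best : Option (Nat × Nat)) mask =>
        if diffs.all (fun d => mask ||| d != 2 ^ t.length - 1) then
          match best with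
          | none => some (pvAbbrLenB mask t.length 0, mask)
          | some (L0, m0) => if pvAbbrLenB mask t.length 0 < L0 then
              some (pvAbbrLenB mask t.length 0, mask) else some (L0, m0)
        else best) sB = none) ∨
    (∃ L m,
      ms.foldl (fun (best : Option (Nat × Nat)) mask =>
        if diffs.all (fun d => mask ||| d != 2 ^ t.length - 1) then
          match best with
          | none => some (pvAbbrLenB mask t.length 0, mask)
          | some (L0, m0) => if pvAbbrLenB mask t.length 0 < L0 then
              some (pvAbbrLenB mask t.length 0, mask) else some (L0, m0)
        else best) sB = some (L, m)
      ∧ L = (pvToAbbrA t m).length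
      ∧ ms.foldl (fun (st : Option Nat × String) mask =>
        if ((match st.1 with | none => true | some m => decide ((pvToAbbrA t mask).length < m))
            && pvIsValidA t dict mask) then
          (some (pvToAbbrA t mask).length, String.ofList (pvToAbbrA t mask))
        else st) sA = (some L, String.ofList (pvToAbbrA t m)))) := by
  intro ms
  induction ms with
  | nil =>
    intro _ sA sB hrel
    rcases hrel with ⟨hB, hA⟩ | ⟨L, m, hB, hL, hA⟩
    · exact Or.inl ⟨hA, hB⟩
    · exact Or.inr ⟨L, m, hB, hL, hA⟩
  | cons mask ms ih =>
    intro hms sA sB hrel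
    simp only [List.foldl_cons]
    have hm : mask < 2 ^ t.length := hms mask List.mem_cons_self
    have hvalid : diffs.all (fun d => mask ||| d != 2 ^ t.length - 1)
        = pvIsValidA t dict mask := by
      rw [hdiffs, pvIsValidA_eq t mask hm dict, List.all_map]
      rfl
    have hlen : pvAbbrLenB mask t.length 0 = (pvToAbbrA t mask).length := by
      rw [pvToAbbrA_eq_build]
      exact pvAbbrLenB_eq_length t mask t.length (t.length - 0) 0 rfl
    apply ih (fun x hx => hms x (List.mem_cons_of_mem _ hx))
    rw [hvalid]
    rcases hrel with ⟨hB, hA⟩ | ⟨L, m, hB, hL, hA⟩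
    · subst hB; subst hA
      cases hv : pvIsValidA t dict mask with
      | true =>
        right
        refine ⟨pvAbbrLenB mask t.length 0, mask, ?_, hlen, ?_⟩
        · simp
        · simp [hlen]
      | false =>
        left
        constructor <;> simp
    · subst hB; subst hA
      cases hv : pvIsValidA t dict mask with
      | true =>
        by_cases hlt : (pvToAbbrA t mask).length < L
        · right
          refine ⟨pvAbbrLenB mask t.length 0, mask, ?_, hlen, ?_⟩
          · simp [hlen, hlt]
          · simp [hlen, hlt]
        · right
          refine ⟨L, m, ?_, hL, ?_⟩
          · simp [hlen, hlt]
          · simp [hlt]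
      | false =>
        right
        refine ⟨L, m, ?_, hL, ?_⟩ <;> simp

-- ===== VERDICT (by name: the statement is the Claim_ definition above) =====
theorem minAbbreviation_spec : Claim_equal_minAbbreviation := by
  unfold Claim_equal_minAbbreviation
  intro target dictionary _
  unfold Spec_minAbbreviation minAbbreviation minAbbreviation_alt
  simp only [List.isEmpty_map]
  cases hemp : (dictionary.filter fun w => w.toList.length == target.toList.length).isEmpty with
  | true => simp
  | false =>
    simp only [Bool.false_eq_true, if_neg Bool.false_ne_true]
    have h := pvFold_inv target.toList
      (List.map String.toList (List.filter (fun w => w.toList.length == target.toList.length) dictionary))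
      (List.map (fun w => pvDiffMask target.toList w.toList)
        (List.filter (fun w => w.toList.length == target.toList.length) dictionary))
      target
      (by rw [List.map_map]; rfl)
      (List.range (2 ^ target.toList.length))
      (fun x hx => List.mem_range.mp hx) (none, target) none (Or.inl ⟨rfl, rfl⟩)
    rcases h with ⟨hA, hB⟩ | ⟨L, m, hB, hL, hA⟩
    · rw [hA, hB]
    · rw [hA, hB]
      show String.ofList (pvToAbbrA target.toList m)
          = String.ofList (pvBuildB target.toList m target.toList.length 0)
      rw [pvToAbbrA_eq_build]
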